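-- pv_equiv track=rewrite | github.com/LRXA2/Reminder-Agent-Public | src/app/reminder_bot.py | _clean_calendar_import_notes
-- ===== SOURCE A (Python) =====
-- def _clean_calendar_import_notes(notes: str) -> str:
--     lines = [line.rstrip() for line in (notes or "").splitlines()]
--     cleaned: list[str] = []
--     for line in lines:
--         stripped = line.strip()
--         lowered = stripped.lower()
--         if not stripped:
--             if cleaned and cleaned[-1] != "":
--                 cleaned.append("")
--             continue
--         if lowered.startswith("reminder id:"):
--             continue
--         if lowered.startswith("priority:"):
--             continue
--         if lowered.startswith("link:"):
--             continue
--         if lowered.startswith("topic:"):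
--             continue
--         cleaned.append(stripped)
--
--     while cleaned and cleaned[-1] == "":
--         cleaned.pop()
--     return "\n".join(cleaned).strip()
-- ===== SOURCE B (Python) =====
-- def _clean_calendar_import_notes(notes: str) -> str:
--     drop = ("reminder id:", "priority:", "link:", "topic:")
--     kept = [s for s in (line.strip() for line in (notes or "").splitlines())
--             if not (s and s.lower().startswith(drop))]
--     parts = [x for i, x in enumerate(kept)
--              if x != "" or (i + 1 < len(kept) and kept[i + 1] != "")]
--     if parts and parts[0] == "":
--         parts = parts[1:]
--     return "\n".join(parts).strip()
-- ===== Notes on version B (the rewrite author's own statement) =====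
-- stated objective: simpler
-- what changed: Replaced A's single stateful accumulator loop (blank bookkeeping against the last appended element, plus a trailing while-pop) by a filter pass over stripped lines followed by a lookahead pass that keeps a blank only when followed by a nonblank line, then a one-step leading-blank trim.
import Mathlib
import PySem

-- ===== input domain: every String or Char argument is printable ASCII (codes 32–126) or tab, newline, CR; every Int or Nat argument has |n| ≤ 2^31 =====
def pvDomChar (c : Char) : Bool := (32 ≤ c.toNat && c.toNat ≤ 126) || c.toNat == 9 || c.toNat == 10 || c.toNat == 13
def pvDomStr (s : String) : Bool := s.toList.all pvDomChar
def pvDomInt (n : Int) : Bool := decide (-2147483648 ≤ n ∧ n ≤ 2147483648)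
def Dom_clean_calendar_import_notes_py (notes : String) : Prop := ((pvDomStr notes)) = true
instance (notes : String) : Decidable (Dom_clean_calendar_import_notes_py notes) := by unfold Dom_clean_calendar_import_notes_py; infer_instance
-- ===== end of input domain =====

-- B replaces A's single stateful accumulator loop (with in-loop blank bookkeeping and a
-- trailing while-pop) by a filter pass followed by a lookahead pass that collapses blank
-- runs and trims the edges; objective: simpler decomposition, same cost.

-- ===== PORT A =====

-- drop the trailing run of elements satisfying p (port of "while l and p(l[-1]): l.pop()")
def pvDropTail {α : Type} (p : α → Bool) (l : List α) : List α :=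
  (l.reverse.dropWhile p).reverse

-- the body of A's for-loop
def pvStepA (cleaned : List String) (line : String) : List String :=
  let stripped := PySem.Str.strip line
  let lowered := PySem.Str.lower stripped
  if stripped = "" then
    (if cleaned ≠ [] ∧ cleaned.getLast? ≠ some "" then cleaned ++ [""] else cleaned)
  else if PySem.Str.startswith lowered "reminder id:" then cleaned
  else if PySem.Str.startswith lowered "priority:" then cleaned
  else if PySem.Str.startswith lowered "link:" then cleaned
  else if PySem.Str.startswith lowered "topic:" then cleaned
  else cleaned ++ [stripped]

def clean_calendar_import_notes_py (notes : String) : String :=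
  let base := if notes = "" then "" else notes
  let lines := (PySem.Str.splitlines base).map PySem.Str.rstrip
  let cleaned := lines.foldl pvStepA []
  PySem.Str.strip (PySem.Str.join "\n" (pvDropTail (· == "") cleaned))

-- ===== PORT B =====

def pvIsDropped (s : String) : Bool :=
  PySem.Str.startswith (PySem.Str.lower s) "reminder id:" ||
  PySem.Str.startswith (PySem.Str.lower s) "priority:" ||
  PySem.Str.startswith (PySem.Str.lower s) "link:" ||
  PySem.Str.startswith (PySem.Str.lower s) "topic:"

-- port of the lookahead comprehension: keep x iff x ≠ "" or the next element is ≠ ""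
def pvDedup : List String → List String
  | [] => []
  | [x] => if x ≠ "" then [x] else []
  | x :: y :: rest => (if x ≠ "" ∨ y ≠ "" then [x] else []) ++ pvDedup (y :: rest)

def clean_calendar_import_notes_py_alt (notes : String) : String :=
  let base := if notes = "" then "" else notes
  let kept := ((PySem.Str.splitlines base).map PySem.Str.strip).filter
    (fun s => !(decide (s ≠ "") && pvIsDropped s))
  let parts := pvDedup kept
  let parts := if parts.head? = some "" then parts.tail else parts
  PySem.Str.strip (PySem.Str.join "\n" parts)

-- ===== PRECONDITION & SPEC =====
def Spec_clean_calendar_import_notes_py (notes : String) (out : String) : Prop := out = clean_calendar_import_notes_py_alt notes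
instance (notes : String) (out : String) : Decidable (Spec_clean_calendar_import_notes_py notes out) := by unfold Spec_clean_calendar_import_notes_py; infer_instance

-- ===== CLAIM (what is proved, stated in full; the proofs are below) =====
def Claim_equal_clean_calendar_import_notes_py : Prop := ∀ (notes : String), Dom_clean_calendar_import_notes_py notes → Spec_clean_calendar_import_notes_py notes (clean_calendar_import_notes_py notes)

-- ===== LEMMAS AND PROOFS =====

-- the essential two-state machine: t = "last emitted element was nonblank"
def pvMach : Bool → List String → List String
  | _, [] => []
  | t, s :: ks =>
    if s = "" then (if t then [""] else []) ++ pvMach false ks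
    else s :: pvMach true ks

def pvStep' (cleaned : List String) (s : String) : List String :=
  if s = "" then (if cleaned ≠ [] ∧ cleaned.getLast? ≠ some "" then cleaned ++ [""] else cleaned)
  else cleaned ++ [s]

theorem pvDropTail_cons {α : Type} (p : α → Bool) (a : α) (l : List α) :
    pvDropTail p (a :: l) =
      if pvDropTail p l = [] then (if p a then [] else [a]) else a :: pvDropTail p l := by
  simp only [pvDropTail, List.reverse_cons, List.dropWhile_append]
  by_cases h : (l.reverse.dropWhile p) = []
  · simp only [h, List.isEmpty_nil, if_true, List.reverse_nil]
    by_cases hp : p a <;> simp [hp, List.dropWhile]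
  · have : (l.reverse.dropWhile p).isEmpty = false := by simp [h]
    simp [this, h]

theorem pvDropWhile_idem {α : Type} (p : α → Bool) (l : List α) :
    (l.dropWhile p).dropWhile p = l.dropWhile p := by
  induction l with
  | nil => rfl
  | cons a l ih => by_cases hp : p a <;> simp [hp, ih]

theorem pvRstrip_eq (cs : List Char) :
    PySem.Chars.rstrip cs = pvDropTail PySem.Chars.isspace cs := rfl

theorem pvRstrip_idem (cs : List Char) :
    PySem.Chars.rstrip (PySem.Chars.rstrip cs) = PySem.Chars.rstrip cs := by
  simp [PySem.Chars.rstrip, List.reverse_reverse, pvDropWhile_idem]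

theorem pvLstrip_rstrip_comm (cs : List Char) :
    PySem.Chars.lstrip (PySem.Chars.rstrip cs) = PySem.Chars.rstrip (PySem.Chars.lstrip cs) := by
  induction cs with
  | nil => rfl
  | cons a cs ih =>
    rw [pvRstrip_eq, pvDropTail_cons]
    by_cases h0 : pvDropTail PySem.Chars.isspace cs = []
    · have hall : ∀ x ∈ cs, PySem.Chars.isspace x = true := by
        intro x hx
        have := congrArg List.reverse h0
        simp only [pvDropTail, List.reverse_reverse, List.reverse_nil] at this
        exact List.dropWhile_eq_nil_iff.mp this x (List.mem_reverse.mpr hx)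
      have hls : PySem.Chars.lstrip cs = [] := List.dropWhile_eq_nil_iff.mpr hall
      by_cases hp : PySem.Chars.isspace a
      · simp only [if_pos h0, if_pos hp]
        have hcons : PySem.Chars.lstrip (a :: cs) = [] := by
          simp only [PySem.Chars.lstrip, List.dropWhile_cons, hp, if_true]
          exact hls
        rw [hcons]
        rfl
      · simp only [if_pos h0, if_neg hp]
        simp [PySem.Chars.lstrip, hp, pvRstrip_eq, pvDropTail_cons, h0]
    · simp only [if_neg h0]
      by_cases hp : PySem.Chars.isspace a
      · simp only [PySem.Chars.lstrip, List.dropWhile_cons, hp, if_true]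
        rw [← PySem.Chars.lstrip, ← pvRstrip_eq, ih]
        rfl
      · simp only [PySem.Chars.lstrip, List.dropWhile_cons, hp]
        simp [pvRstrip_eq, pvDropTail_cons, h0]

theorem pvStrip_rstrip_chars (cs : List Char) :
    PySem.Chars.strip (PySem.Chars.rstrip cs) = PySem.Chars.strip cs := by
  simp only [PySem.Chars.strip]
  rw [pvLstrip_rstrip_comm, pvRstrip_idem]

theorem pvStrip_rstrip (s : String) :
    PySem.Str.strip (PySem.Str.rstrip s) = PySem.Str.strip s := by
  simp only [PySem.Str.strip, PySem.Str.rstrip]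
  rw [String.toList_ofList, pvStrip_rstrip_chars]

-- A's pvStep' fold equals the machine output
theorem pvFoldl_mach (ks : List String) : ∀ (acc : List String),
    ks.foldl pvStep' acc =
      acc ++ pvMach (decide (acc ≠ []) && !(acc.getLast? == some "")) ks := by
  induction ks with
  | nil => intro acc; simp [pvMach]
  | cons s ks ih =>
    intro acc
    by_cases hs : s = ""
    · subst hs
      by_cases hacc : acc ≠ [] ∧ acc.getLast? ≠ some ""
      · have : pvStep' acc "" = acc ++ [""] := by simp [pvStep', hacc]
        simp only [List.foldl_cons, this, ih]
        have h1 : (acc ++ [""]).getLast? = some "" := by simp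
        have h2 : acc ++ [""] ≠ [] := by simp
        simp [pvMach, h1, h2, hacc.1, hacc.2]
      · have : pvStep' acc "" = acc := by simp [pvStep', hacc]
        simp only [List.foldl_cons, this, ih]
        rcases not_and_or.mp hacc with h | h
        · have : acc = [] := not_not.mp h
          subst this; simp [pvMach]
        · have h' : acc.getLast? = some "" := not_not.mp h
          simp [pvMach, h']
    · have : pvStep' acc s = acc ++ [s] := by simp [pvStep', hs]
      simp only [List.foldl_cons, this, ih]
      have h1 : (acc ++ [s]).getLast? = some s := by simp
      have hb : (s == "") = false := by simp [hs]
      simp [pvMach, hs, h1, hb]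

-- a nonblank head survives pvDedup
theorem pvDedup_cons_ne (y : String) (rest : List String) (hy : y ≠ "") :
    ∃ t, pvDedup (y :: rest) = y :: t := by
  cases rest with
  | nil => exact ⟨[], by simp [pvDedup, hy]⟩
  | cons z r => exact ⟨pvDedup (z :: r), by simp [pvDedup, hy]⟩

-- pvDedup of a blank-headed list is empty or "" followed by a nonempty tail
theorem pvDedup_blank_head (rest : List String) :
    pvDedup ("" :: rest) = [] ∨ ∃ D, D ≠ [] ∧ pvDedup ("" :: rest) = "" :: D := by
  induction rest with
  | nil => left; simp [pvDedup]
  | cons z r ih =>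
    by_cases hz : z = ""
    · subst hz
      have : pvDedup ("" :: "" :: r) = pvDedup ("" :: r) := by simp [pvDedup]
      rw [this]; exact ih
    · right
      obtain ⟨t, ht⟩ := pvDedup_cons_ne z r hz
      refine ⟨z :: t, by simp, ?_⟩
      simp [pvDedup, hz, ht]

-- the two central run-collapse lemmas
theorem pvMach_dedup (ks : List String) :
    (pvDropTail (· == "") (pvMach true ks) = pvDedup ks) ∧
    (pvDropTail (· == "") (pvMach false ks) =
      (if (pvDedup ks).head? = some "" then (pvDedup ks).tail else pvDedup ks)) := by
  induction ks with
  | nil => constructor <;> simp [pvMach, pvDedup, pvDropTail]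
  | cons x ks ih =>
    cases ks with
    | nil =>
      by_cases hx : x = ""
      · subst hx
        constructor <;> simp [pvMach, pvDedup, pvDropTail, List.dropWhile]
      · have hb : (x == "") = false := by simp [hx]
        constructor <;> simp [pvMach, pvDedup, pvDropTail, hx, hb]
    | cons y rest =>
      by_cases hx : x = ""
      · subst hx
        have hm1 : pvMach true ("" :: y :: rest) = "" :: pvMach false (y :: rest) := by
          simp [pvMach]
        have hm0 : pvMach false ("" :: y :: rest) = pvMach false (y :: rest) := by
          simp [pvMach]
        constructor
        · rw [hm1, pvDropTail_cons, ih.2]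
          by_cases hy : y = ""
          · subst hy
            have hD : pvDedup ("" :: "" :: rest) = pvDedup ("" :: rest) := by simp [pvDedup]
            rw [hD]
            rcases pvDedup_blank_head rest with h | ⟨D, hD1, hD2⟩
            · simp [h]
            · simp [hD2, hD1]
          · obtain ⟨t, ht⟩ := pvDedup_cons_ne y rest hy
            have hDk : pvDedup ("" :: y :: rest) = "" :: pvDedup (y :: rest) := by
              simp [pvDedup, hy]
            rw [hDk, ht]
            simp [hy]
        · rw [hm0, ih.2]
          by_cases hy : y = ""
          · subst hy
            have hD : pvDedup ("" :: "" :: rest) = pvDedup ("" :: rest) := by simp [pvDedup]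
            rw [hD]
          · have hDk : pvDedup ("" :: y :: rest) = "" :: pvDedup (y :: rest) := by
              simp [pvDedup, hy]
            obtain ⟨t, ht⟩ := pvDedup_cons_ne y rest hy
            rw [hDk, ht]
            simp [hy]
      · have hm : ∀ t, pvMach t (x :: y :: rest) = x :: pvMach true (y :: rest) := by
          intro t; simp [pvMach, hx]
        have hDk : pvDedup (x :: y :: rest) = x :: pvDedup (y :: rest) := by
          simp [pvDedup, hx]
        have hb : (x == "") = false := by simp [hx]
        constructor
        · rw [hm true, pvDropTail_cons, ih.1, hDk]
          by_cases hE : pvDedup (y :: rest) = [] <;> simp [hE, hb]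
        · rw [hm false, pvDropTail_cons, ih.1, hDk]
          by_cases hE : pvDedup (y :: rest) = [] <;> simp [hE, hb, hx]

-- filter bridge: A's in-loop skipping equals folding pvStep' over the filtered list
def pvStep2 (cleaned : List String) (stripped : String) : List String :=
  let lowered := PySem.Str.lower stripped
  if stripped = "" then
    (if cleaned ≠ [] ∧ cleaned.getLast? ≠ some "" then cleaned ++ [""] else cleaned)
  else if PySem.Str.startswith lowered "reminder id:" then cleaned
  else if PySem.Str.startswith lowered "priority:" then cleaned
  else if PySem.Str.startswith lowered "link:" then cleaned
  else if PySem.Str.startswith lowered "topic:" then cleaned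
  else cleaned ++ [stripped]

theorem pvStepA_eq (acc : List String) (line : String) :
    pvStepA acc line = pvStep2 acc (PySem.Str.strip line) := rfl

theorem pvFoldl_filter (lines : List String) : ∀ (acc : List String),
    lines.foldl pvStepA acc =
    ((lines.map PySem.Str.strip).filter
      (fun s => !(decide (s ≠ "") && pvIsDropped s))).foldl pvStep' acc := by
  induction lines with
  | nil => intro acc; simp
  | cons line lines ih =>
    intro acc
    rw [List.foldl_cons, List.map_cons, List.filter_cons, pvStepA_eq]
    generalize PySem.Str.strip line = v
    by_cases hs : v = ""
    · subst hs
      have hf : (!(decide (("" : String) ≠ "") && pvIsDropped "")) = true := by decide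
      simp only [hf, if_true, List.foldl_cons]
      have hA : pvStep2 acc "" = pvStep' acc "" := by
        simp [pvStep2, pvStep']
      rw [hA, ih]
    · by_cases hd : pvIsDropped v = true
      · have hf : (!(decide (v ≠ "") && pvIsDropped v)) = false := by simp [hs, hd]
        simp only [hf, Bool.false_eq_true, if_false]
        have hA : pvStep2 acc v = acc := by
          simp only [pvStep2, if_neg hs]
          split_ifs with h1 h2 h3 h4
          · rfl
          · rfl
          · rfl
          · rfl
          · exfalso
            simp only [pvIsDropped, Bool.or_eq_true] at hd
            rcases hd with ((x | x) | x) | x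
            · exact h1 x
            · exact h2 x
            · exact h3 x
            · exact h4 x
        rw [hA, ih]
      · have hf : (!(decide (v ≠ "") && pvIsDropped v)) = true := by simp [hs, hd]
        simp only [hf, if_true, List.foldl_cons]
        have hd' : pvIsDropped v = false := eq_false_of_ne_true hd
        simp only [pvIsDropped, Bool.or_eq_false_iff] at hd'
        obtain ⟨⟨⟨h1, h2⟩, h3⟩, h4⟩ := hd'
        have hA : pvStep2 acc v = pvStep' acc v := by
          simp only [pvStep2, pvStep', if_neg hs, h1, h2, h3, h4,
            Bool.false_eq_true, if_false]
        rw [hA, ih]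

theorem pvCore (L : List String) :
    pvDropTail (· == "") ((L.map PySem.Str.rstrip).foldl pvStepA []) =
      (if (pvDedup ((L.map PySem.Str.strip).filter
          (fun s => !(decide (s ≠ "") && pvIsDropped s)))).head? = some ""
       then (pvDedup ((L.map PySem.Str.strip).filter
          (fun s => !(decide (s ≠ "") && pvIsDropped s)))).tail
       else pvDedup ((L.map PySem.Str.strip).filter
          (fun s => !(decide (s ≠ "") && pvIsDropped s)))) := by
  have hmap : (L.map PySem.Str.rstrip).map PySem.Str.strip = L.map PySem.Str.strip := by
    rw [List.map_map]
    exact List.map_congr_left (fun x _ => pvStrip_rstrip x)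
  rw [pvFoldl_filter, hmap, pvFoldl_mach]
  simp only [ne_eq, not_true_eq_false, decide_false, Bool.false_and, List.nil_append,
    List.getLast?_nil]
  exact (pvMach_dedup _).2

-- ===== VERDICT (by name: the statement is the Claim_ definition above) =====
theorem clean_calendar_import_notes_py_spec : Claim_equal_clean_calendar_import_notes_py := by
  intro notes _
  unfold Spec_clean_calendar_import_notes_py
  unfold clean_calendar_import_notes_py clean_calendar_import_notes_py_alt
  exact congrArg (fun l => PySem.Str.strip (PySem.Str.join "\n" l))
    (pvCore (PySem.Str.splitlines (if notes = "" then "" else notes)))
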